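-- pv_equiv track=rewrite | github.com/KevinUniud/API_Logica | python/generator.py | _predicate_symbols
-- ===== SOURCE A (Python) =====
-- def _req_int_ge(name: str, value: int, minimum: int) -> None:
--     """Verifica che un valore numerico sia un intero sopra una soglia minima."""
--     if not isinstance(value, int) or value < minimum:
--         raise ValueError(f"{name} deve essere un intero >= {minimum}")
--
-- def _predicate_symbols(count: int) -> list[str]:
--     """Restituisce simboli predicato in stile A, B, C, ... per il quiz quantificato."""
--     _req_int_ge("count", count, 1)
--     base = [chr(code) for code in range(ord("A"), ord("Z") + 1)]
--     if count <= len(base):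
--         return base[:count]
--
--     extended = list(base)
--     suffix = 1
--     while len(extended) < count:
--         for symbol in base:
--             extended.append(f"{symbol}{suffix}")
--             if len(extended) >= count:
--                 break
--         suffix += 1
--     return extended
-- ===== SOURCE B (Python) =====
-- def _req_int_ge(name: str, value: int, minimum: int) -> None:
--     if not isinstance(value, int) or value < minimum:
--         raise ValueError(f"{name} deve essere un intero >= {minimum}")
--
-- def _predicate_symbols(count: int) -> list[str]:
--     """Each symbol is computed directly from its index: letter i%26, suffix i//26."""
--     _req_int_ge("count", count, 1)
--     base = [chr(ord("A") + k) for k in range(26)]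
--     return [base[i % 26] if i < 26 else f"{base[i % 26]}{i // 26}" for i in range(count)]
-- ===== Notes on version B (the rewrite author's own statement) =====
-- stated objective: simpler
-- what changed: Replaces the while-loop that grows a list with a maintained suffix counter and an inner for-with-break by a single flat list comprehension computing each symbol directly from its index (letter i % 26, suffix i // 26).
import Mathlib
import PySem

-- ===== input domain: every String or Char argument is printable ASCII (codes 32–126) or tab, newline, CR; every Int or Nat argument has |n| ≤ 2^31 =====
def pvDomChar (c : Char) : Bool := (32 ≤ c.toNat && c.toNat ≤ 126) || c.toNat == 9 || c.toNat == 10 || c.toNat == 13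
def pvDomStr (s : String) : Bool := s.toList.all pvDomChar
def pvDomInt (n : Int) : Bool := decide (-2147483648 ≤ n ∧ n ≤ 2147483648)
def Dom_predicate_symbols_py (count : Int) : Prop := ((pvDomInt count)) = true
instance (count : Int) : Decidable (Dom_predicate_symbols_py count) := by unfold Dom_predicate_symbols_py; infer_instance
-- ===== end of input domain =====

-- B computes each symbol directly from its index (i % 26, i // 26) in one flat pass,
-- replacing A's while-loop that grows a list with a maintained suffix counter and a break.

-- ===== PORT A =====
def pvBaseA : List String := (PySem.List.pyRange 65 91 1).map (fun code => String.ofList [Char.ofNat code.toNat])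

-- inner 'for symbol in base: append; if len >= count: break'
def pvRowA : List String → List String → Int → Int → List String
  | [], ext, _, _ => ext
  | s :: rest, ext, suffix, count =>
      let e := ext ++ [s ++ PySem.Int.toStr suffix]
      if count ≤ (e.length : Int) then e
      else pvRowA rest e suffix count

-- outer 'while len(extended) < count' (fuel-bounded; count.toNat steps always suffice)
def pvLoopA : Nat → List String → Int → Int → List String
  | 0, ext, _, _ => ext
  | fuel + 1, ext, suffix, count =>
      if (ext.length : Int) < count then
        pvLoopA fuel (pvRowA pvBaseA ext suffix count) (suffix + 1) count
      else ext

def predicate_symbols_py (count : Int) : List String :=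
  if count < 1 then []   -- _req_int_ge raises ValueError here; excluded by Pre_
  else if count ≤ (pvBaseA.length : Int) then PySem.List.slice pvBaseA none (some count)
  else pvLoopA count.toNat pvBaseA 1 count

-- ===== PORT B =====
def pvBaseB : List String := (PySem.List.pyRange 0 26 1).map (fun k => String.ofList [Char.ofNat (65 + k).toNat])

def predicate_symbols_py_alt (count : Int) : List String :=
  if count < 1 then []   -- _req_int_ge raises ValueError here; excluded by Pre_
  else (PySem.List.pyRange 0 count 1).map (fun i =>
    if i < 26 then PySem.List.pyGetD pvBaseB (PySem.Int.mod i 26) ""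
    else PySem.List.pyGetD pvBaseB (PySem.Int.mod i 26) "" ++ PySem.Int.toStr (PySem.Int.floordiv i 26))

-- ===== PRECONDITION & SPEC =====
-- Pre_ excludes exactly count < 1, where the Python A (and B) raises ValueError.
def Pre_predicate_symbols_py (count : Int) : Prop := 1 ≤ count
instance (count : Int) : Decidable (Pre_predicate_symbols_py count) := by unfold Pre_predicate_symbols_py; infer_instance
def pvWitness_predicate_symbols_py : Int := 30

def Spec_predicate_symbols_py (count : Int) (out : List String) : Prop := out = predicate_symbols_py_alt count
instance (count : Int) (out : List String) : Decidable (Spec_predicate_symbols_py count out) := by unfold Spec_predicate_symbols_py; infer_instance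

-- ===== CLAIM (what is proved, stated in full; the proofs are below) =====
def Claim_equal_predicate_symbols_py : Prop := ∀ (count : Int), Dom_predicate_symbols_py count → Pre_predicate_symbols_py count → Spec_predicate_symbols_py count (predicate_symbols_py count)

-- ===== LEMMAS AND PROOFS =====

-- the i-th symbol of the sequence, and its prefix of length n
def pvG (i : Nat) : String :=
  if i < 26 then pvBaseB.getD i "" else pvBaseB.getD (i % 26) "" ++ PySem.Int.toStr ((i / 26 : Nat) : Int)

def pvT (n : Nat) : List String := (List.range n).map pvG

theorem pvBaseA_eq : pvBaseA = pvBaseB := by decide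

theorem pvBaseB_len : pvBaseB.length = 26 := by decide

theorem pvT_length (n : Nat) : (pvT n).length = n := by simp [pvT]

theorem pvT_succ (n : Nat) : pvT (n + 1) = pvT n ++ [pvG n] := by
  simp [pvT, List.range_succ]

theorem pvT_take (n : Nat) (h : n ≤ 26) : pvT n = pvBaseB.take n := by
  apply List.ext_getElem
  · simp [pvT_length, pvBaseB_len]; omega
  · intro i h1 h2
    have hi : i < n := by simpa [pvT_length] using h1
    have hi26 : i < 26 := by omega
    simp [pvT, pvG, hi26, pvBaseB_len]

theorem pvG_high (s j : Nat) (hs : 1 ≤ s) (hj : j < 26) :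
    pvG (26 * s + j) = pvBaseB[j]'(by rw [pvBaseB_len]; omega) ++ PySem.Int.toStr (s : Int) := by
  have h1 : ¬ (26 * s + j < 26) := by omega
  have h2 : (26 * s + j) % 26 = j := by omega
  have h3 : (26 * s + j) / 26 = s := by omega
  simp [pvG, h1, h2, h3, pvBaseB_len, hj]

theorem row_spec : ∀ (rest : List String) (j : Nat), ∀ (s count : Nat),
    rest = pvBaseB.drop j → j ≤ 26 → 1 ≤ s → 26 * s + j < count →
    pvRowA rest (pvT (26 * s + j)) (s : Int) (count : Int) = pvT (min count (26 * s + 26)) := by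
  intro rest
  induction rest with
  | nil =>
    intro j s count hdrop hj hs hlt
    have hlen : pvBaseB.length ≤ j := List.drop_eq_nil_iff.mp hdrop.symm
    rw [pvBaseB_len] at hlen
    have hj26 : j = 26 := by omega
    subst hj26
    have hmin : min count (26 * s + 26) = 26 * s + 26 := by omega
    simp [pvRowA, hmin]
  | cons x rest' ih =>
    intro j s count hdrop hj hs hlt
    have hjlt : j < pvBaseB.length := by
      by_contra h
      rw [List.drop_eq_nil_of_le (by omega)] at hdrop
      exact absurd hdrop (by simp)
    have hcons := List.drop_eq_getElem_cons (l := pvBaseB) hjlt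
    rw [hcons] at hdrop
    obtain ⟨hx, hrest⟩ := List.cons_eq_cons.mp hdrop
    have hj26 : j < 26 := by rw [pvBaseB_len] at hjlt; exact hjlt
    have he : pvT (26 * s + j) ++ [x ++ PySem.Int.toStr (s : Int)] = pvT (26 * s + j + 1) := by
      rw [pvT_succ, hx, pvG_high s j hs hj26]
    show (if (count : Int) ≤ ((pvT (26 * s + j) ++ [x ++ PySem.Int.toStr (s : Int)]).length : Int) then _
          else pvRowA rest' _ _ _) = _
    rw [he]
    by_cases hbrk : (count : Int) ≤ ((pvT (26 * s + j + 1)).length : Int)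
    · rw [if_pos hbrk]
      rw [pvT_length] at hbrk
      have hceq : count = 26 * s + j + 1 := by exact_mod_cast le_antisymm (by exact_mod_cast hbrk) (by omega)
      have hmin : min count (26 * s + 26) = count := by omega
      rw [hmin, hceq]
    · rw [if_neg hbrk]
      rw [pvT_length] at hbrk
      have hcgt : 26 * s + j + 1 < count := by
        have : ¬ count ≤ 26 * s + j + 1 := by exact_mod_cast hbrk
        omega
      have := ih (j + 1) s count hrest (by omega) hs (by omega)
      rw [show 26 * s + (j + 1) = 26 * s + j + 1 by omega] at this
      exact this

theorem loop_exit (fuel : Nat) (ext : List String) (s c : Int)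
    (h : ¬ ((ext.length : Int) < c)) : pvLoopA fuel ext s c = ext := by
  cases fuel <;> simp [pvLoopA, h]

theorem loop_spec : ∀ (fuel s count : Nat), 1 ≤ s → 26 * s < count → count ≤ 26 * s + fuel →
    pvLoopA fuel (pvT (26 * s)) (s : Int) (count : Int) = pvT count := by
  intro fuel
  induction fuel with
  | zero => intro s count _ h1 h2; omega
  | succ fuel ih =>
    intro s count hs h1 h2
    have hcond : ((pvT (26 * s)).length : Int) < (count : Int) := by
      rw [pvT_length]; exact_mod_cast h1
    rw [pvLoopA, if_pos hcond, pvBaseA_eq]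
    have hrow := row_spec (pvBaseB.drop 0) 0 s count rfl (by omega) hs (by omega)
    simp only [List.drop_zero, Nat.add_zero] at hrow
    rw [hrow]
    by_cases hle : count ≤ 26 * s + 26
    · have hmin : min count (26 * s + 26) = count := by omega
      rw [hmin]
      exact loop_exit _ _ _ _ (by rw [pvT_length]; omega)
    · have hmin : min count (26 * s + 26) = 26 * (s + 1) := by omega
      rw [hmin]
      have := ih (s + 1) count (by omega) (by omega) (by omega)
      rw [show ((s + 1 : Nat) : Int) = (s : Int) + 1 by push_cast; ring] at this
      exact this

theorem pvT_26 : pvT 26 = pvBaseB := by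
  rw [pvT_take 26 (by omega), ← pvBaseB_len, List.take_length]

theorem alt_eq_pvT (count : Int) (hc : 1 ≤ count) :
    predicate_symbols_py_alt count = pvT count.toNat := by
  unfold predicate_symbols_py_alt pvT
  rw [if_neg (by omega), PySem.List.pyRange_one]
  simp only [sub_zero, List.map_map]
  apply List.map_congr_left
  intro k hk
  simp only [Function.comp_apply, zero_add]
  rw [show PySem.Int.mod ((k : Nat) : Int) 26 = (((k % 26 : Nat)) : Int) from PySem.Int.mod_natCast k 26]
  rw [show PySem.Int.floordiv ((k : Nat) : Int) 26 = (((k / 26 : Nat)) : Int) from PySem.Int.floordiv_natCast k 26]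
  rw [PySem.List.pyGetD_natCast]
  unfold pvG
  by_cases h26 : k < 26
  · rw [if_pos (by exact_mod_cast h26), if_pos h26, Nat.mod_eq_of_lt h26]
  · rw [if_neg (by exact_mod_cast h26), if_neg h26]

-- ===== VERDICT (by name: the statement is the Claim_ definition above) =====
theorem predicate_symbols_py_spec : Claim_equal_predicate_symbols_py := by
  intro count _ hpre
  have hc : 1 ≤ count := hpre
  show predicate_symbols_py count = predicate_symbols_py_alt count
  rw [alt_eq_pvT count hc]
  unfold predicate_symbols_py
  rw [if_neg (by omega), pvBaseA_eq, pvBaseB_len]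
  by_cases hle : count ≤ (26 : Int)
  · rw [if_pos (by exact_mod_cast hle)]
    rw [PySem.List.slice_to _ (by omega)]
    rw [pvT_take count.toNat (by omega)]
  · rw [if_neg (by exact_mod_cast hle)]
    have hcast : (count.toNat : Int) = count := Int.toNat_of_nonneg (by omega)
    have := loop_spec count.toNat 1 count.toNat (by omega) (by omega) (by omega)
    rw [pvT_26, hcast] at this
    simpa using this
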